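-- pv_equiv track=rewrite | github.com/abasse-lab/CA117_PYTHON_LABS | password_012.py | passw
-- ===== SOURCE A (Python) =====
-- def passw(s):
--     a = 0
--     b = 0
--     c = 0
--     d = 0
--     for element in s:
--         if element.isdigit():
--             a = 1
--         elif element.isupper():
--             b = 1
--         elif element.islower():
--             c = 1
--         else:
--             d = 1
--     return a + b + c + d
-- ===== SOURCE B (Python) =====
-- def passw(s):
--     d = any(ch.isdigit() for ch in s)
--     u = any(ch.isupper() for ch in s)
--     l = any(ch.islower() for ch in s)
--     o = any(not (ch.isdigit() or ch.isupper() or ch.islower()) for ch in s)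
--     return d + u + l + o
-- ===== Notes on version B (the rewrite author's own statement) =====
-- stated objective: idiomatic
-- what changed: Replaced the single interleaved flag-setting loop with four independent any() existence checks, one per character category, summed as booleans.
import Mathlib
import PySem

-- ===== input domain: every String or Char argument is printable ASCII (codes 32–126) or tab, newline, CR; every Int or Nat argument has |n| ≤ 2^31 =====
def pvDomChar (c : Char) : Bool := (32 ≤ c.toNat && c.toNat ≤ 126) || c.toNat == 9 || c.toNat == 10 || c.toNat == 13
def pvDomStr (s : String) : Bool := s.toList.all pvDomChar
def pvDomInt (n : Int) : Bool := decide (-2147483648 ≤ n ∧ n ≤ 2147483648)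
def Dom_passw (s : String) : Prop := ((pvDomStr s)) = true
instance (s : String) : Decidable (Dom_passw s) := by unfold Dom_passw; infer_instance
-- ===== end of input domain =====

-- B replaces A's interleaved flag-setting loop by four independent any() existence checks (idiomatic).

-- ===== PORT A =====
-- the for-loop over s with the four flags a b c d as the fold state
def passwLoop (l : List Char) (st : Int × Int × Int × Int) : Int × Int × Int × Int :=
  l.foldl (fun st ch =>
    if PySem.Chars.isdigit ch then (1, st.2.1, st.2.2.1, st.2.2.2)
    else if PySem.Chars.isupper ch then (st.1, 1, st.2.2.1, st.2.2.2)
    else if PySem.Chars.islower ch then (st.1, st.2.1, 1, st.2.2.2)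
    else (st.1, st.2.1, st.2.2.1, 1)) st

def passw (s : String) : Int :=
  let st := passwLoop s.toList (0, 0, 0, 0)
  st.1 + st.2.1 + st.2.2.1 + st.2.2.2

-- ===== PORT B =====
def boolToInt (b : Bool) : Int := if b then 1 else 0

def passw_alt (s : String) : Int :=
  let d := s.toList.any (fun ch => PySem.Chars.isdigit ch)
  let u := s.toList.any (fun ch => PySem.Chars.isupper ch)
  let l := s.toList.any (fun ch => PySem.Chars.islower ch)
  let o := s.toList.any (fun ch =>
    !(PySem.Chars.isdigit ch || PySem.Chars.isupper ch || PySem.Chars.islower ch))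
  boolToInt d + boolToInt u + boolToInt l + boolToInt o

-- ===== PRECONDITION & SPEC =====
def Spec_passw (s : String) (out : Int) : Prop := out = passw_alt s
instance (s : String) (out : Int) : Decidable (Spec_passw s out) := by unfold Spec_passw; infer_instance

-- ===== CLAIM (what is proved, stated in full; the proofs are below) =====
def Claim_equal_passw : Prop := ∀ (s : String), Dom_passw s → Spec_passw s (passw s)

-- ===== LEMMAS AND PROOFS =====

-- characterisation of the flag loop: each flag becomes 1 iff its category occurs, else keeps its value
theorem passwLoop_char (l : List Char) (a b c d : Int) :
    passwLoop l (a, b, c, d) =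
      ((if l.any (fun ch => PySem.Chars.isdigit ch) then 1 else a),
       (if l.any (fun ch => !PySem.Chars.isdigit ch && PySem.Chars.isupper ch) then 1 else b),
       (if l.any (fun ch => !PySem.Chars.isdigit ch && !PySem.Chars.isupper ch &&
          PySem.Chars.islower ch) then 1 else c),
       (if l.any (fun ch => !PySem.Chars.isdigit ch && !PySem.Chars.isupper ch &&
          !PySem.Chars.islower ch) then 1 else d)) := by
  induction l generalizing a b c d with
  | nil => simp [passwLoop]
  | cons ch t ih =>
    simp only [passwLoop, List.foldl_cons, List.any_cons] at *
    by_cases h1 : PySem.Chars.isdigit ch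
    · simp [h1, ih]
    · by_cases h2 : PySem.Chars.isupper ch
      · simp [h1, h2, ih]
      · by_cases h3 : PySem.Chars.islower ch
        · simp [h1, h2, h3, ih]
        · simp [h1, h2, h3, ih]

-- isdigit / isupper / islower are pairwise exclusive (disjoint ASCII ranges)
theorem digit_not_upper (ch : Char) (h : PySem.Chars.isdigit ch = true) :
    PySem.Chars.isupper ch = false := by
  simp [PySem.Chars.isdigit, PySem.Chars.isupper, Char.le_def, UInt32.le_iff_toNat_le] at *
  omega

theorem digit_not_lower (ch : Char) (h : PySem.Chars.isdigit ch = true) :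
    PySem.Chars.islower ch = false := by
  simp [PySem.Chars.isdigit, PySem.Chars.islower, Char.le_def, UInt32.le_iff_toNat_le] at *
  omega

theorem upper_not_lower (ch : Char) (h : PySem.Chars.isupper ch = true) :
    PySem.Chars.islower ch = false := by
  simp [PySem.Chars.isupper, PySem.Chars.islower, Char.le_def, UInt32.le_iff_toNat_le] at *
  omega

theorem any_upper_eq (l : List Char) :
    l.any (fun ch => !PySem.Chars.isdigit ch && PySem.Chars.isupper ch) =
    l.any (fun ch => PySem.Chars.isupper ch) := by
  refine List.any_congr rfl (fun ch => ?_)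
  by_cases h : PySem.Chars.isdigit ch
  · simp [h, digit_not_upper ch h]
  · simp [h]

theorem any_lower_eq (l : List Char) :
    l.any (fun ch => !PySem.Chars.isdigit ch && !PySem.Chars.isupper ch &&
      PySem.Chars.islower ch) = l.any (fun ch => PySem.Chars.islower ch) := by
  refine List.any_congr rfl (fun ch => ?_)
  by_cases h1 : PySem.Chars.isdigit ch
  · simp [h1, digit_not_lower ch h1]
  · by_cases h2 : PySem.Chars.isupper ch
    · simp [h1, h2, upper_not_lower ch h2]
    · simp [h1, h2]

theorem any_other_eq (l : List Char) :
    l.any (fun ch => !PySem.Chars.isdigit ch && !PySem.Chars.isupper ch &&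
      !PySem.Chars.islower ch) =
    l.any (fun ch =>
      !(PySem.Chars.isdigit ch || PySem.Chars.isupper ch || PySem.Chars.islower ch)) := by
  refine List.any_congr rfl (fun ch => ?_)
  cases PySem.Chars.isdigit ch <;> cases PySem.Chars.isupper ch <;>
    cases PySem.Chars.islower ch <;> simp

-- ===== VERDICT (by name: the statement is the Claim_ definition above) =====
theorem passw_spec : Claim_equal_passw := by
  intro s _
  unfold Spec_passw passw passw_alt
  rw [passwLoop_char, any_upper_eq, any_lower_eq, any_other_eq]
  simp [boolToInt]
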